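-- pv_equiv track=rewrite | github.com/xinuvic/V2XPlatoonScenario | PlatoonScenarioRealmap/CountConsecutiveColli.py | Delay_list
-- ===== SOURCE A (Python) =====
-- def Delay_list(Alist,TransmitInterval):#输入Alist是一串连续时隙碰撞与否的列表，如果为0则为碰撞，如果为数值，则为接入时延，接入时延与选择时隙有关
--     accum_0_list=[]
--     accum_1_list=[]
--     if Alist[0]!=0:
--         accum_1_list.append(Alist[0])
--     for i in range(1,len(Alist)-1):
--         if Alist[i-1]!=0:#前一个不是0，前一个成功
--             if Alist[i]==0:#从当前为0的时刻开始，找到0截止的时刻，统计本段持续为0的次数accu_0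
--                 accu_0=1
--                 for s in range(i,len(Alist)):
--                     if Alist[s]==0:
--                         accu_0+=1
--                     else:
--                         break
--                 accum_0_list.append((accu_0-1)*TransmitInterval+Alist[s])
--             else:
--                 accum_1_list.append(Alist[i])
--     if Alist[-2]!=0 and Alist[-1]!=0:
--         accum_1_list.append(Alist[-1])
--     return accum_0_list+accum_1_list
-- ===== SOURCE B (Python) =====
-- def Delay_list(Alist, TransmitInterval):
--     # Single left-to-right pass: track previous value and the length of the
--     # currently open counted zero-run; collect delays (zeros) and successes (ones).
--     n = len(Alist)
--     zeros = []
--     ones = []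
--     run_len = 0          # 0 = no open counted run
--     prev = 0
--     for idx, x in enumerate(Alist):
--         if x == 0:
--             if run_len > 0:
--                 run_len += 1
--             elif idx >= 1 and idx <= n - 2 and prev != 0:
--                 run_len = 1
--         else:
--             if run_len > 0:
--                 zeros.append(run_len * TransmitInterval + x)
--                 run_len = 0
--             if idx == 0 or prev != 0:
--                 ones.append(x)
--         prev = x
--     if run_len > 0:
--         zeros.append(run_len * TransmitInterval)
--     return zeros + ones
-- ===== Notes on version B (the rewrite author's own statement) =====
-- stated objective: alternative
-- what changed: A scans indices 1..n-2 and, at each run start, rescans forward with a nested break-loop over Alist[s:] to measure the zero run; B makes a single stateful left-to-right pass over enumerate(Alist), carrying the previous value and an open-run counter, so the nested rescan disappears.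
import Mathlib
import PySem

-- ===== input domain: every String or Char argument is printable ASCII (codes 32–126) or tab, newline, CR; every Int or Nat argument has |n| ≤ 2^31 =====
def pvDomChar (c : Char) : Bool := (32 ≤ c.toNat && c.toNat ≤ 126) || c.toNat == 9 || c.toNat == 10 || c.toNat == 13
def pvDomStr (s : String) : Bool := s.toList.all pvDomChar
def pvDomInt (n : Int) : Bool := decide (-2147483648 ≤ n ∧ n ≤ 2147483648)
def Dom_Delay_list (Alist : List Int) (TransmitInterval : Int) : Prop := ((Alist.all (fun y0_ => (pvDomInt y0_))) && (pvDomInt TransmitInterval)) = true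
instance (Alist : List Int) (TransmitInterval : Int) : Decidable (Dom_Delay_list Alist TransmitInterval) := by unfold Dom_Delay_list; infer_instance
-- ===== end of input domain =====

-- B replaces A's rescanning inner loop by a single stateful left-to-right pass over enumerate(Alist); alternative decomposition, same asymptotic cost.


-- ===== PORT A =====
-- inner 'for s in range(i, len(Alist))' with break: state (accu_0, s, broken)
def pvInnerStep (Alist : List Int) (st : Int × Int × Bool) (s : Int) : Int × Int × Bool :=
  if st.2.2 then st
  else if PySem.List.pyGetD Alist s 0 = 0 then (st.1 + 1, s, false)
  else (st.1, s, true)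

-- body of 'for i in range(1, len(Alist)-1)': acc = (accum_0_list, accum_1_list)
def pvAStep (Alist : List Int) (TransmitInterval : Int) (acc : List Int × List Int) (i : Int) :
    List Int × List Int :=
  if PySem.List.pyGetD Alist (i - 1) 0 ≠ 0 then
    if PySem.List.pyGetD Alist i 0 = 0 then
      let inner := (PySem.List.pyRange i (PySem.List.len Alist) 1).foldl (pvInnerStep Alist) (1, i, false)
      (acc.1 ++ [(inner.1 - 1) * TransmitInterval + PySem.List.pyGetD Alist inner.2.1 0], acc.2)
    else (acc.1, acc.2 ++ [PySem.List.pyGetD Alist i 0])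
  else acc

def Delay_list (Alist : List Int) (TransmitInterval : Int) : List Int :=
  let accum1 : List Int :=
    if PySem.List.pyGetD Alist 0 0 ≠ 0 then [PySem.List.pyGetD Alist 0 0] else []
  let st := (PySem.List.pyRange 1 (PySem.List.len Alist - 1) 1).foldl
    (pvAStep Alist TransmitInterval) ([], accum1)
  let accum1' :=
    if PySem.List.pyGetD Alist (-2) 0 ≠ 0 ∧ PySem.List.pyGetD Alist (-1) 0 ≠ 0 then
      st.2 ++ [PySem.List.pyGetD Alist (-1) 0]
    else st.2
  st.1 ++ accum1'

-- ===== PORT B =====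
-- loop body of Source B: state (zeros, ones, run_len, prev); nI = len(Alist)
def pvBStep (nI TransmitInterval : Int) (st : List Int × List Int × Int × Int) (p : Int × Int) :
    List Int × List Int × Int × Int :=
  if p.2 = 0 then
    if 0 < st.2.2.1 then (st.1, st.2.1, st.2.2.1 + 1, p.2)
    else if 1 ≤ p.1 ∧ p.1 ≤ nI - 2 ∧ st.2.2.2 ≠ 0 then (st.1, st.2.1, 1, p.2)
    else (st.1, st.2.1, st.2.2.1, p.2)
  else
    let zeros := if 0 < st.2.2.1 then st.1 ++ [st.2.2.1 * TransmitInterval + p.2] else st.1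
    let runLen : Int := if 0 < st.2.2.1 then 0 else st.2.2.1
    let ones := if p.1 = 0 ∨ st.2.2.2 ≠ 0 then st.2.1 ++ [p.2] else st.2.1
    (zeros, ones, runLen, p.2)

def Delay_list_alt (Alist : List Int) (TransmitInterval : Int) : List Int :=
  let st := (PySem.List.enumerate Alist 0).foldl
    (pvBStep (PySem.List.len Alist) TransmitInterval) ([], [], 0, 0)
  let zeros := if 0 < st.2.2.1 then st.1 ++ [st.2.2.1 * TransmitInterval] else st.1
  zeros ++ st.2.1

-- ===== PRECONDITION & SPEC =====
-- Pre_ excludes only lists of length < 2, on which A raises IndexError (Alist[0] / Alist[-2]).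
def Pre_Delay_list (Alist : List Int) (TransmitInterval : Int) : Prop := 2 ≤ Alist.length
instance (Alist : List Int) (TransmitInterval : Int) : Decidable (Pre_Delay_list Alist TransmitInterval) := by unfold Pre_Delay_list; infer_instance
def pvWitness_Delay_list : List Int × Int := ([1, 0], 1)

def Spec_Delay_list (Alist : List Int) (TransmitInterval : Int) (out : List Int) : Prop := out = Delay_list_alt Alist TransmitInterval
instance (Alist : List Int) (TransmitInterval : Int) (out : List Int) : Decidable (Spec_Delay_list Alist TransmitInterval out) := by unfold Spec_Delay_list; infer_instance

-- ===== CLAIM (what is proved, stated in full; the proofs are below) =====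
def Claim_equal_Delay_list : Prop := ∀ (Alist : List Int) (TransmitInterval : Int), Dom_Delay_list Alist TransmitInterval → Pre_Delay_list Alist TransmitInterval → Spec_Delay_list Alist TransmitInterval (Delay_list Alist TransmitInterval)
-- ===== LEMMAS AND PROOFS =====

-- value of slot i (0 is what Python would raise on; indices stay in range under Pre_)
def pvGetL (L : List Int) (i : Nat) : Int := L.getD i 0
-- length of the zero run starting at index k
def pvZrun (L : List Int) (k : Nat) : Nat := ((L.drop k).takeWhile (fun x => x == 0)).length
-- the value that closes the run starting at k (0 if the run reaches the end of the list)
def pvCloseV (L : List Int) (k : Nat) : Int :=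
  if k + pvZrun L k < L.length then pvGetL L (k + pvZrun L k) else 0
-- the delay recorded for a counted run starting at k
def pvZval (L : List Int) (TI : Int) (k : Nat) : Int := (pvZrun L k : Int) * TI + pvCloseV L k
def pvP0 (L : List Int) (j : Nat) : Bool := decide (pvGetL L (j-1) ≠ 0) && decide (pvGetL L j = 0)
def pvP1 (L : List Int) (j : Nat) : Bool := decide (pvGetL L (j-1) ≠ 0) && decide (pvGetL L j ≠ 0)
-- the delays contributed by counted runs starting at index ≥ k
def pvZZ (L : List Int) (TI : Int) (k : Nat) : List Int :=
  ((List.range' k (L.length - 1 - k)).filter (pvP0 L)).map (pvZval L TI)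
-- the successes contributed at indices ≥ k ≥ 1
def pvOO (L : List Int) (k : Nat) : List Int :=
  ((List.range' k (L.length - k)).filter (pvP1 L)).map (pvGetL L)


-- basic facts about pvZrun
theorem pvZrun_of_ge (L : List Int) (k : Nat) (h : L.length ≤ k) : pvZrun L k = 0 := by
  unfold pvZrun
  rw [List.drop_eq_nil_of_le h]
  rfl

theorem pvZrun_succ (L : List Int) (k : Nat) (hk : k < L.length) (h0 : pvGetL L k = 0) :
    pvZrun L k = pvZrun L (k+1) + 1 := by
  unfold pvZrun
  rw [List.drop_eq_getElem_cons hk, List.takeWhile_cons]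
  have : L[k] = (0:Int) := by
    have := List.getD_eq_getElem L 0 hk
    unfold pvGetL at h0; omega
  simp [this]

theorem pvZrun_zero (L : List Int) (k : Nat) (h0 : pvGetL L k ≠ 0) : pvZrun L k = 0 := by
  by_cases hk : k < L.length
  · unfold pvZrun
    rw [List.drop_eq_getElem_cons hk, List.takeWhile_cons]
    have : L[k] ≠ (0:Int) := by
      have := List.getD_eq_getElem L 0 hk
      unfold pvGetL at h0; omega
    simp [this]
  · exact pvZrun_of_ge L k (by omega)

theorem pvZrun_le (L : List Int) (k : Nat) : pvZrun L k ≤ L.length - k := by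
  unfold pvZrun
  have h1 := (List.takeWhile_sublist (l := L.drop k) (fun x : Int => x == 0)).length_le
  simp at h1 ⊢
  omega

theorem pvZrun_interior' (L : List Int) :
    ∀ d k, k + d < k + pvZrun L k → pvGetL L (k + d) = 0 := by
  intro d
  induction d with
  | zero =>
    intro k h
    by_contra hne
    rw [pvZrun_zero L k hne] at h; omega
  | succ m ih =>
    intro k h
    have hz : pvGetL L k = 0 := by
      by_contra hne
      rw [pvZrun_zero L k hne] at h; omega
    have hk : k < L.length := by
      by_contra hge
      rw [pvZrun_of_ge L k (by omega)] at h; omega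
    have hs := pvZrun_succ L k hk hz
    have : (k+1) + m < (k+1) + pvZrun L (k+1) := by omega
    have := ih (k+1) this
    have : k + (m+1) = (k+1) + m := by omega
    rw [this]
    exact ih (k+1) (by omega)

theorem pvZrun_interior (L : List Int) (k j : Nat) (h1 : k ≤ j) (h2 : j < k + pvZrun L k) :
    pvGetL L j = 0 := by
  have : j = k + (j - k) := by omega
  rw [this]
  exact pvZrun_interior' L (j - k) k (by omega)

-- skipping indices on which a filter predicate is false
theorem pvFilter_skip (P : Nat → Bool) :
    ∀ e a b c, a + e = b → a ≤ b → (∀ j, a ≤ j → j < b → j < c → P j = false) →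
    (List.range' a (c - a)).filter P = (List.range' b (c - b)).filter P := by
  intro e
  induction e with
  | zero => intro a b c hab _ _; have : a = b := by omega
            subst this; rfl
  | succ m ih =>
    intro a b c hab hle h
    by_cases hac : a < c
    · have : c - a = (c - (a+1)) + 1 := by omega
      rw [this, List.range'_succ, List.filter_cons]
      rw [h a (by omega) (by omega) (by omega)]
      exact ih (a+1) b c (by omega) (by omega) (fun j h1 h2 h3 => h j (by omega) h2 h3)
    · have h1 : c - a = 0 := by omega
      have h2 : c - b = 0 := by omega
      rw [h1, h2]
      rfl


theorem pvGetL_def (L : List Int) (i : Nat) : L.getD i 0 = pvGetL L i := rfl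

-- the inner break-loop never changes a broken state
theorem pvBroken (L : List Int) : ∀ (l : List Int) (c s : Int),
    l.foldl (pvInnerStep L) (c, s, true) = (c, s, true) := by
  intro l
  induction l with
  | nil => intro c s; rfl
  | cons x t ih => intro c s; rw [List.foldl_cons]; simp only [pvInnerStep]; exact ih c s

-- characterisation of the inner break-loop of A
theorem pvInner_char (L : List Int) : ∀ (r j : Nat) (c sv0 : Int), pvZrun L j = r → j < L.length →
    (PySem.List.pyRange (j:Int) (L.length:Int) 1).foldl (pvInnerStep L) (c, sv0, false) =
      if j + r < L.length then (c + (r:Int), ((j + r : Nat) : Int), true)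
      else (c + (r:Int), ((L.length - 1 : Nat) : Int), false) := by
  intro r
  induction r with
  | zero =>
    intro j c sv0 hz hj
    have hne : pvGetL L j ≠ 0 := by
      intro h0
      rw [pvZrun_succ L j hj h0] at hz; omega
    rw [PySem.List.pyRange_one_cons (by exact_mod_cast hj), List.foldl_cons]
    have hstep : pvInnerStep L (c, sv0, false) (j:Int) = (c, (j:Int), true) := by
      simp only [pvInnerStep, PySem.List.pyGetD_natCast, pvGetL_def]
      simp [hne]
    rw [hstep, pvBroken]
    simp [hj]
  | succ m ih =>
    intro j c sv0 hz hj
    have h0 : pvGetL L j = 0 := by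
      by_contra hne
      rw [pvZrun_zero L j hne] at hz; omega
    rw [PySem.List.pyRange_one_cons (by exact_mod_cast hj), List.foldl_cons]
    have hstep : pvInnerStep L (c, sv0, false) (j:Int) = (c + 1, (j:Int), false) := by
      simp only [pvInnerStep, PySem.List.pyGetD_natCast, pvGetL_def]
      simp [h0]
    rw [hstep]
    have hcast : (j:Int) + 1 = ((j+1 : Nat):Int) := by omega
    rw [hcast]
    by_cases hj1 : j + 1 < L.length
    · have hm : pvZrun L (j+1) = m := by
        have := pvZrun_succ L j hj h0; omega
      rw [ih (j+1) (c+1) (j:Int) hm hj1]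
      have he : j + 1 + m = j + (m + 1) := by omega
      by_cases hlt : j + (m+1) < L.length
      · rw [if_pos (by omega), if_pos hlt]
        have e1 : c + 1 + (m:Int) = c + ((m+1:Nat):Int) := by push_cast; ring
        have e2 : ((j+1+m:Nat):Int) = ((j+(m+1):Nat):Int) := by push_cast; ring
        rw [e1, e2]
      · rw [if_neg (by omega), if_neg hlt]
        have e1 : c + 1 + (m:Int) = c + ((m+1:Nat):Int) := by push_cast; ring
        rw [e1]
    · have hm0 : m = 0 := by
        have h1 := pvZrun_succ L j hj h0
        have h2 := pvZrun_of_ge L (j+1) (by omega)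
        omega
      rw [PySem.List.pyRange_one_eq_nil (by exact_mod_cast (by omega : L.length ≤ j + 1))]
      rw [List.foldl_nil, if_neg (by omega)]
      subst hm0
      have e1 : c + 1 = c + (((0:Nat)+1:Nat):Int) := by push_cast; ring
      have hj' : j = L.length - 1 := by omega
      rw [e1, hj']

-- the value A's inner loop produces is the run delay pvZval
theorem pvInner_val (L : List Int) (TI : Int) (i : Nat) (hi : i < L.length)
    (h0 : pvGetL L i = 0) :
    (((PySem.List.pyRange (i:Int) (L.length:Int) 1).foldl (pvInnerStep L) (1, (i:Int), false)).1 - 1) * TI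
      + PySem.List.pyGetD L ((PySem.List.pyRange (i:Int) (L.length:Int) 1).foldl (pvInnerStep L) (1, (i:Int), false)).2.1 0
    = pvZval L TI i := by
  rw [pvInner_char L (pvZrun L i) i 1 (i:Int) rfl hi]
  have hr1 : 1 ≤ pvZrun L i := by
    have := pvZrun_succ L i hi h0; omega
  have hle : i + pvZrun L i ≤ L.length := by
    have := pvZrun_le L i; omega
  by_cases h : i + pvZrun L i < L.length
  · rw [if_pos h]
    simp only [PySem.List.pyGetD_natCast, pvGetL_def]
    unfold pvZval pvCloseV
    rw [if_pos h]
    ring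
  · rw [if_neg h]
    simp only [PySem.List.pyGetD_natCast, pvGetL_def]
    have hend : pvGetL L (L.length - 1) = 0 := by
      apply pvZrun_interior L i (L.length - 1) (by omega) (by omega)
    unfold pvZval pvCloseV
    rw [if_neg h, hend]
    ring

-- pyRange over natural endpoints is a cast of range'
theorem pvRange_cast (a b : Nat) :
    PySem.List.pyRange (a:Int) (b:Int) 1 = (List.range' a (b - a)).map (fun k : Nat => (k : Int)) := by
  rw [PySem.List.pyRange_one, List.range'_eq_map_range, List.map_map]
  have h1 : ((b:Int) - (a:Int)).toNat = b - a := by omega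
  rw [h1]
  apply List.map_congr_left
  intro k _
  simp only [Function.comp_apply]
  push_cast
  ring

theorem pvRange_cast1 (b : Nat) :
    PySem.List.pyRange 1 (b:Int) 1 = (List.range' 1 (b - 1)).map (fun k : Nat => (k : Int)) := by
  have h := pvRange_cast 1 b
  simpa using h

-- A computes: delays of counted runs, then first slot, then later successes
theorem pvA_eq (L : List Int) (TI : Int) (h2 : 2 ≤ L.length) :
    Delay_list L TI
      = pvZZ L TI 1 ++ ((if pvGetL L 0 ≠ 0 then [pvGetL L 0] else []) ++ pvOO L 1) := by
  unfold Delay_list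
  simp only [PySem.List.len_eq]
  have hc : (L.length : Int) - 1 = ((L.length - 1 : Nat) : Int) := by omega
  rw [hc, pvRange_cast1 (L.length - 1), List.foldl_map]
  have hstep : ∀ (acc : List Int × List Int) (i : Nat), i ∈ List.range' 1 (L.length - 1 - 1) →
      pvAStep L TI acc (i:Int)
        = (if pvP0 L i then acc.1 ++ [pvZval L TI i] else acc.1,
           if pvP1 L i then acc.2 ++ [pvGetL L i] else acc.2) := by
    intro acc i hi
    have hmem : 1 ≤ i ∧ i < 1 + (L.length - 1 - 1) := List.mem_range'_1.mp hi
    have hii : i < L.length := by omega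
    unfold pvAStep
    simp only [PySem.List.len_eq]
    have h1 : ((i:Int) - 1) = ((i - 1 : Nat):Int) := by omega
    rw [h1]
    simp only [PySem.List.pyGetD_natCast, pvGetL_def]
    by_cases hprev : pvGetL L (i-1) = 0
    · rw [if_neg (not_not_intro hprev)]
      have p0 : pvP0 L i = false := by simp [pvP0, hprev]
      have p1 : pvP1 L i = false := by simp [pvP1, hprev]
      rw [p0, p1]
      simp
    · have hprev' : pvGetL L (i-1) ≠ 0 := hprev
      rw [if_pos hprev']
      by_cases hx : pvGetL L i = 0
      · rw [if_pos hx]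
        have p0 : pvP0 L i = true := by simp [pvP0, hprev', hx]
        have p1 : pvP1 L i = false := by simp [pvP1, hx]
        have hv := pvInner_val L TI i hii hx
        rw [p0, p1]
        simp only [if_false, Bool.false_eq_true, if_pos]
        simp [hv]
      · rw [if_neg hx]
        have p0 : pvP0 L i = false := by simp [pvP0, hx]
        have p1 : pvP1 L i = true := by simp [pvP1, hprev', hx]
        rw [p0, p1]
        simp
  rw [PySem.List.foldl_congr_mem _ _ _ _ hstep]
  rw [PySem.List.foldl_prod_mk (f := fun a0 i => if pvP0 L i then a0 ++ [pvZval L TI i] else a0)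
        (g := fun a1 i => if pvP1 L i then a1 ++ [pvGetL L i] else a1)]
  rw [PySem.List.foldl_append_if, PySem.List.foldl_append_if]
  rw [PySem.List.pyGetD_neg_ofNat L 2 0 (by omega) (by omega)]
  rw [PySem.List.pyGetD_neg_ofNat L 1 0 (by omega) (by omega)]
  have hg2 : L[L.length - 2] = pvGetL L (L.length - 2) := by
    rw [← pvGetL_def]; exact (List.getD_eq_getElem L 0 (by omega)).symm
  have hg1 : L[L.length - 1] = pvGetL L (L.length - 1) := by
    rw [← pvGetL_def]; exact (List.getD_eq_getElem L 0 (by omega)).symm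
  have hg0 : PySem.List.pyGetD L 0 0 = pvGetL L 0 := by
    rw [PySem.List.pyGetD_zero, pvGetL_def]
  rw [hg2, hg1, hg0]
  have hOO : pvOO L 1 = ((List.range' 1 (L.length - 1 - 1)).filter (pvP1 L)).map (pvGetL L)
      ++ (if pvGetL L (L.length - 2) ≠ 0 ∧ pvGetL L (L.length - 1) ≠ 0
          then [pvGetL L (L.length - 1)] else []) := by
    unfold pvOO
    have hcnt : L.length - 1 = (L.length - 1 - 1) + 1 := by omega
    conv_lhs => rw [hcnt, List.range'_1_concat]
    rw [List.filter_append, List.map_append]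
    congr 1
    have hidx : 1 + (L.length - 1 - 1) = L.length - 1 := by omega
    rw [hidx]
    by_cases hcond : pvGetL L (L.length - 2) ≠ 0 ∧ pvGetL L (L.length - 1) ≠ 0
    · rw [if_pos hcond]
      have hp : pvP1 L (L.length - 1) = true := by
        have : L.length - 1 - 1 = L.length - 2 := by omega
        simp [pvP1, this, hcond.1, hcond.2]
      simp [hp]
    · rw [if_neg hcond]
      have hp : pvP1 L (L.length - 1) = false := by
        have he : L.length - 1 - 1 = L.length - 2 := by omega
        simp only [pvP1, he]
        rcases not_and_or.mp hcond with h | h <;> simp at h <;> simp [h]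
      simp [hp]
  have hZZdef : ([] : List Int)
      ++ (List.map (pvZval L TI) (List.filter (pvP0 L) (List.range' 1 (L.length - 1 - 1))))
      = pvZZ L TI 1 := by
    rw [List.nil_append]; rfl
  rw [hZZdef, hOO]
  by_cases hcond : pvGetL L (L.length - 2) ≠ 0 ∧ pvGetL L (L.length - 1) ≠ 0
  · rw [if_pos hcond, if_pos hcond]
    simp [List.append_assoc]
  · rw [if_neg hcond, if_neg hcond]
    simp [List.append_assoc]

theorem pvZZ_nil (L : List Int) (TI : Int) (k : Nat) (h : L.length ≤ k + 1) :
    pvZZ L TI k = [] := by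
  unfold pvZZ
  have : L.length - 1 - k = 0 := by omega
  rw [this]
  rfl

theorem pvZZ_cons (L : List Int) (TI : Int) (k : Nat) (h : k + 2 ≤ L.length) :
    pvZZ L TI k = (if pvP0 L k then [pvZval L TI k] else []) ++ pvZZ L TI (k+1) := by
  unfold pvZZ
  have hcnt : L.length - 1 - k = (L.length - 1 - (k+1)) + 1 := by omega
  rw [hcnt, List.range'_succ, List.filter_cons]
  by_cases hp : pvP0 L k
  · rw [if_pos hp, if_pos hp, List.map_cons]; rfl
  · rw [if_neg hp, if_neg hp]; rfl

theorem pvOO_cons (L : List Int) (k : Nat) (hk : k < L.length) :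
    pvOO L k = (if pvP1 L k then [pvGetL L k] else []) ++ pvOO L (k+1) := by
  unfold pvOO
  have hcnt : L.length - k = (L.length - (k+1)) + 1 := by omega
  rw [hcnt, List.range'_succ, List.filter_cons]
  by_cases hp : pvP1 L k
  · rw [if_pos hp, if_pos hp, List.map_cons]; rfl
  · rw [if_neg hp, if_neg hp]; rfl

theorem pvZZ_step (L : List Int) (TI : Int) (k : Nat) (h : pvP0 L k = false) :
    pvZZ L TI k = pvZZ L TI (k+1) := by
  by_cases hk : k + 2 ≤ L.length
  · rw [pvZZ_cons L TI k hk, h]; rfl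
  · rw [pvZZ_nil L TI k (by omega), pvZZ_nil L TI (k+1) (by omega)]

theorem pvCloseV_succ (L : List Int) (k : Nat) (hk : k < L.length) (hx : pvGetL L k = 0) :
    pvCloseV L (k+1) = pvCloseV L k := by
  unfold pvCloseV
  have h : (k+1) + pvZrun L (k+1) = k + pvZrun L k := by
    have := pvZrun_succ L k hk hx; omega
  rw [h]

-- after a counted run, the indices inside the run contribute no further run starts
theorem pvZZ_skip (L : List Int) (TI : Int) (k : Nat) :
    pvZZ L TI (k+1) = pvZZ L TI (k + pvZrun L k + 1) := by
  unfold pvZZ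
  refine congrArg (List.map (pvZval L TI)) ?_
  apply pvFilter_skip (pvP0 L) (pvZrun L k) (k+1) (k + pvZrun L k + 1) (L.length - 1)
    (by omega) (by omega)
  intro j hj1 hj2 _
  have hz : pvGetL L (j-1) = 0 :=
    pvZrun_interior L k (j-1) (by omega) (by omega)
  simp [pvP0, hz]

-- nor does the run itself contribute successes
theorem pvOO_skip (L : List Int) (k : Nat) (hk : k < L.length) (hx : pvGetL L k = 0) :
    pvOO L k = pvOO L (k + pvZrun L k + 1) := by
  unfold pvOO
  refine congrArg (List.map (pvGetL L)) ?_
  apply pvFilter_skip (pvP1 L) (pvZrun L k + 1) k (k + pvZrun L k + 1) L.length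
    (by omega) (by omega)
  intro j hj1 hj2 _
  by_cases hjk : j = k
  · subst hjk; simp [pvP1, hx]
  · have hz : pvGetL L (j-1) = 0 :=
      pvZrun_interior L k (j-1) (by omega) (by omega)
    simp [pvP1, hz]

-- result assembly of B after the loop
def pvBres (TI : Int) (st : List Int × List Int × Int × Int) : List Int × List Int :=
  (if 0 < st.2.2.1 then st.1 ++ [st.2.2.1 * TI] else st.1, st.2.1)

-- invariant of B's single pass, from position k on, run closed / run open
theorem pvB_main (L : List Int) (TI : Int) :
    ∀ (d k : Nat), L.length - k = d → 1 ≤ k → k ≤ L.length →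
      (∀ z o, pvBres TI ((PySem.List.enumerate (L.drop k) (k:Int)).foldl
            (pvBStep (L.length:Int) TI) (z, o, 0, pvGetL L (k-1)))
          = (z ++ pvZZ L TI k, o ++ pvOO L k))
      ∧ (∀ z o rl, 0 < rl → pvGetL L (k-1) = 0 →
          pvBres TI ((PySem.List.enumerate (L.drop k) (k:Int)).foldl
              (pvBStep (L.length:Int) TI) (z, o, rl, 0))
            = (z ++ ([(rl + (pvZrun L k : Int)) * TI + pvCloseV L k]
                      ++ pvZZ L TI (k + pvZrun L k + 1)),
               o ++ pvOO L (k + pvZrun L k + 1))) := by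
  intro d
  induction d with
  | zero =>
    intro k hd h1 hle
    have hk : k = L.length := by omega
    have hdrop : L.drop k = [] := List.drop_eq_nil_of_le (by omega)
    constructor
    · intro z o
      rw [hdrop, PySem.List.enumerate_nil, List.foldl_nil]
      unfold pvBres
      dsimp only
      rw [if_neg (by omega : ¬ (0:Int) < 0)]
      rw [pvZZ_nil L TI k (by omega)]
      have hOO : pvOO L k = [] := by
        unfold pvOO
        have : L.length - k = 0 := by omega
        rw [this]; rfl
      rw [hOO]
      simp
    · intro z o rl hrl _
      rw [hdrop, PySem.List.enumerate_nil, List.foldl_nil]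
      unfold pvBres
      dsimp only
      rw [if_pos hrl]
      have hz : pvZrun L k = 0 := pvZrun_of_ge L k (by omega)
      rw [pvZZ_nil L TI (k + pvZrun L k + 1) (by omega)]
      have hOO : pvOO L (k + pvZrun L k + 1) = [] := by
        unfold pvOO
        have : L.length - (k + pvZrun L k + 1) = 0 := by omega
        rw [this]; rfl
      rw [hOO]
      have hcv : pvCloseV L k = 0 := by
        unfold pvCloseV
        rw [if_neg (by omega)]
      rw [hcv, hz]
      have e : (rl + ((0:Nat):Int)) * TI + 0 = rl * TI := by push_cast; ring
      rw [e]
      simp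
  | succ d ih =>
    intro k hd h1 hle
    have hk : k < L.length := by omega
    have hgk : L[k] = pvGetL L k := by
      rw [← pvGetL_def]; exact (List.getD_eq_getElem L 0 hk).symm
    have hdrop : L.drop k = L[k] :: L.drop (k+1) := List.drop_eq_getElem_cons hk
    have hcast : (k:Int) + 1 = ((k+1:Nat):Int) := by push_cast; ring
    have IH := ih (k+1) (by omega) (by omega) (by omega)
    have IHC := IH.1
    have IHO := IH.2
    simp only [Nat.add_sub_cancel] at IHC IHO
    constructor
    · intro z o
      rw [hdrop, hgk, PySem.List.enumerate_cons, List.foldl_cons, hcast]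
      by_cases hx : pvGetL L k = 0
      · by_cases hcond : 1 ≤ k ∧ k + 2 ≤ L.length ∧ pvGetL L (k-1) ≠ 0
        · have hstep : pvBStep (L.length:Int) TI (z, o, 0, pvGetL L (k-1)) ((k:Int), pvGetL L k)
              = (z, o, 1, (0:Int)) := by
            simp only [pvBStep]
            rw [if_pos hx, if_neg (by omega),
                if_pos ⟨by exact_mod_cast hcond.1, by push_cast; omega, hcond.2.2⟩, hx]
          rw [hstep, IHO z o 1 one_pos hx]
          have hsucc : pvZrun L k = pvZrun L (k+1) + 1 := pvZrun_succ L k hk hx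
          have hZZ : pvZZ L TI k
              = ((1 + (pvZrun L (k+1) : Int)) * TI + pvCloseV L (k+1))
                  :: pvZZ L TI ((k+1) + pvZrun L (k+1) + 1) := by
            rw [pvZZ_cons L TI k hcond.2.1]
            have hp : pvP0 L k = true := by simp [pvP0, hcond.2.2, hx]
            rw [hp, if_pos rfl]
            have hval : pvZval L TI k = (1 + (pvZrun L (k+1) : Int)) * TI + pvCloseV L (k+1) := by
              unfold pvZval
              rw [pvCloseV_succ L k hk hx, hsucc]
              push_cast; ring
            have hidx : (k+1) + pvZrun L (k+1) + 1 = k + pvZrun L k + 1 := by omega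
            rw [hval, hidx, ← pvZZ_skip L TI k]
            rfl
          have hOO : pvOO L k = pvOO L ((k+1) + pvZrun L (k+1) + 1) := by
            have hidx : (k+1) + pvZrun L (k+1) + 1 = k + pvZrun L k + 1 := by omega
            rw [hidx]
            exact pvOO_skip L k hk hx
          rw [hZZ, hOO]
          rfl
        · have hstep : pvBStep (L.length:Int) TI (z, o, 0, pvGetL L (k-1)) ((k:Int), pvGetL L k)
              = (z, o, 0, pvGetL L k) := by
            simp only [pvBStep]
            rw [if_pos hx, if_neg (by omega), if_neg ?hc]
            case hc =>
              rintro ⟨hc1, hc2, hc3⟩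
              exact hcond ⟨by exact_mod_cast hc1, by omega, hc3⟩
          rw [hstep, IHC z o]
          have hZZ : pvZZ L TI k = pvZZ L TI (k+1) := by
            by_cases hk2 : k + 2 ≤ L.length
            · apply pvZZ_step
              have hprev : pvGetL L (k-1) = 0 := by
                by_contra hne
                exact hcond ⟨h1, hk2, hne⟩
              simp [pvP0, hprev]
            · rw [pvZZ_nil L TI k (by omega), pvZZ_nil L TI (k+1) (by omega)]
          have hOO : pvOO L k = pvOO L (k+1) := by
            rw [pvOO_cons L k hk]
            have hp : pvP1 L k = false := by simp [pvP1, hx]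
            rw [hp]
            rfl
          rw [hZZ, hOO]
      · have hZZ : pvZZ L TI k = pvZZ L TI (k+1) := by
          by_cases hk2 : k + 2 ≤ L.length
          · apply pvZZ_step; simp [pvP0, hx]
          · rw [pvZZ_nil L TI k (by omega), pvZZ_nil L TI (k+1) (by omega)]
        have hk0 : ¬((k:Int) = 0) := by
          intro h
          have : k = 0 := by exact_mod_cast h
          omega
        by_cases hprev : pvGetL L (k-1) = 0
        · have hstep : pvBStep (L.length:Int) TI (z, o, 0, pvGetL L (k-1)) ((k:Int), pvGetL L k)
              = (z, o, 0, pvGetL L k) := by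
            simp only [pvBStep]
            rw [if_neg hx]
            norm_num
            exact ⟨by omega, hprev⟩
          rw [hstep, IHC z o, hZZ]
          have hOO : pvOO L k = pvOO L (k+1) := by
            rw [pvOO_cons L k hk]
            have hp : pvP1 L k = false := by simp [pvP1, hprev]
            rw [hp]
            rfl
          rw [hOO]
        · have hstep : pvBStep (L.length:Int) TI (z, o, 0, pvGetL L (k-1)) ((k:Int), pvGetL L k)
              = (z, o ++ [pvGetL L k], 0, pvGetL L k) := by
            simp only [pvBStep]
            rw [if_neg hx]
            norm_num
            exact fun _ => hprev
          rw [hstep, IHC z (o ++ [pvGetL L k]), hZZ]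
          have hOO : pvOO L k = [pvGetL L k] ++ pvOO L (k+1) := by
            rw [pvOO_cons L k hk]
            have hp : pvP1 L k = true := by simp [pvP1, hprev, hx]
            rw [hp, if_pos rfl]
          rw [hOO]
          simp
    · intro z o rl hrl hprev
      rw [hdrop, hgk, PySem.List.enumerate_cons, List.foldl_cons, hcast]
      by_cases hx : pvGetL L k = 0
      · have hstep : pvBStep (L.length:Int) TI (z, o, rl, 0) ((k:Int), pvGetL L k)
            = (z, o, rl + 1, (0:Int)) := by
          simp only [pvBStep]
          rw [if_pos hx, if_pos hrl, hx]
        rw [hstep, IHO z o (rl+1) (by omega) hx]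
        have hsucc : pvZrun L k = pvZrun L (k+1) + 1 := pvZrun_succ L k hk hx
        have hidx : (k+1) + pvZrun L (k+1) + 1 = k + pvZrun L k + 1 := by omega
        have hcv := pvCloseV_succ L k hk hx
        have hco : (rl + 1 + (pvZrun L (k+1) : Int)) * TI + pvCloseV L (k+1)
            = (rl + (pvZrun L k : Int)) * TI + pvCloseV L k := by
          rw [hcv, hsucc]; push_cast; ring
        rw [hidx, hco]
      · have hstep : pvBStep (L.length:Int) TI (z, o, rl, 0) ((k:Int), pvGetL L k)
            = (z ++ [rl * TI + pvGetL L k], o, 0, pvGetL L k) := by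
          simp only [pvBStep]
          rw [if_neg hx]
          norm_num [hrl]
          omega
        rw [hstep, IHC (z ++ [rl * TI + pvGetL L k]) o]
        have hz0 : pvZrun L k = 0 := pvZrun_zero L k hx
        have hcv : pvCloseV L k = pvGetL L k := by
          unfold pvCloseV
          rw [hz0]
          simp [hk]
        rw [hz0, hcv]
        have e : (rl + ((0:Nat):Int)) * TI + pvGetL L k = rl * TI + pvGetL L k := by
          push_cast; ring
        rw [e]
        simp [List.append_assoc]

-- B computes the same assembled value
theorem pvB_eq (L : List Int) (TI : Int) (h2 : 2 ≤ L.length) :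
    Delay_list_alt L TI
      = pvZZ L TI 1 ++ ((if pvGetL L 0 ≠ 0 then [pvGetL L 0] else []) ++ pvOO L 1) := by
  match L, h2 with
  | x :: t, h2 =>
  unfold Delay_list_alt
  simp only [PySem.List.len_eq]
  have hres : ∀ st : List Int × List Int × Int × Int,
      ((if 0 < st.2.2.1 then st.1 ++ [st.2.2.1 * TI] else st.1) ++ st.2.1)
        = (pvBres TI st).1 ++ (pvBres TI st).2 := fun st => rfl
  rw [hres]
  have henum : PySem.List.enumerate (x :: t) (0:Int)
      = ((0:Int), x) :: PySem.List.enumerate t ((1:Nat):Int) := by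
    rw [PySem.List.enumerate_cons]
    norm_num
  rw [henum, List.foldl_cons]
  have hC := (pvB_main (x :: t) TI ((x :: t).length - 1) 1 rfl (le_refl 1) (by simp)).1
  simp only [Nat.sub_self, List.drop_one, List.tail_cons] at hC
  have hg0 : pvGetL (x :: t) 0 = x := rfl
  by_cases hx : x = 0
  · have hstep : pvBStep ((x :: t).length : Int) TI ([], [], 0, 0) ((0:Int), x)
        = ([], [], 0, pvGetL (x :: t) 0) := by
      simp only [pvBStep, hg0]
      rw [if_pos hx]
      norm_num
    rw [hstep, hC [] []]
    dsimp only
    rw [hg0, if_neg (not_not_intro hx)]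
    simp
  · have hstep : pvBStep ((x :: t).length : Int) TI ([], [], 0, 0) ((0:Int), x)
        = ([], [x], 0, pvGetL (x :: t) 0) := by
      simp only [pvBStep, hg0]
      rw [if_neg hx]
      norm_num
    rw [hstep, hC [] [x]]
    dsimp only
    rw [hg0, if_pos hx]
    simp

theorem Delay_list_spec : Claim_equal_Delay_list := by
  intro A TI _ hpre
  unfold Spec_Delay_list
  rw [pvA_eq A TI hpre, pvB_eq A TI hpre]
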